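-- pv_equiv track=rewrite | github.com/lossinimagesvaran-code/resume-ai-optimizer | clothing_advisor/fashion_dataset.py | _colors_complement
-- ===== SOURCE A (Python) =====
-- def _colors_complement(new_color: str, existing_colors: set) -> bool:
--     """Check if a new color complements existing colors in the outfit"""
--     # Professional color combinations
--     complementary_sets = [
--         {'navy', 'white', 'grey', 'black'},
--         {'black', 'white', 'grey'},
--         {'brown', 'beige', 'cream', 'tan'},
--         {'blue', 'white', 'grey'},
--         {'green', 'brown', 'beige'},
--     ]
--
--     for color_set in complementary_sets:
--         if new_color in color_set and any(existing in color_set for existing in existing_colors):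
--             return True
--
--     # Always allow neutral colors
--     neutral_colors = {'black', 'white', 'grey', 'navy', 'beige', 'cream'}
--     if new_color in neutral_colors:
--         return True
--
--     return len(existing_colors) == 0  # First color always works
-- ===== SOURCE B (Python) =====
-- # Inverted partner index built once: color -> union of all complementary sets
-- # containing it; the call does one set intersection instead of looping over sets.
-- _COMPLEMENTARY_GROUPS = [
--     ('navy', 'white', 'grey', 'black'),
--     ('black', 'white', 'grey'),
--     ('brown', 'beige', 'cream', 'tan'),
--     ('blue', 'white', 'grey'),
--     ('green', 'brown', 'beige'),
-- ]
--
-- _PARTNERS = {}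
-- for _group in _COMPLEMENTARY_GROUPS:
--     for _color in _group:
--         _PARTNERS[_color] = _PARTNERS.get(_color, frozenset()) | frozenset(_group)
--
-- _NEUTRAL_COLORS = frozenset({'black', 'white', 'grey', 'navy', 'beige', 'cream'})
--
--
-- def _colors_complement(new_color: str, existing_colors: set) -> bool:
--     if _PARTNERS.get(new_color, frozenset()) & set(existing_colors):
--         return True
--     if new_color in _NEUTRAL_COLORS:
--         return True
--     return len(existing_colors) == 0
-- ===== Notes on version B (the rewrite author's own statement) =====
-- stated objective: idiomatic
-- what changed: Replaces the per-call loop over the five complementary sets with a module-level inverted index (color -> union of its complementary sets), so the call does a single dict lookup plus one set intersection.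
import Mathlib
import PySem

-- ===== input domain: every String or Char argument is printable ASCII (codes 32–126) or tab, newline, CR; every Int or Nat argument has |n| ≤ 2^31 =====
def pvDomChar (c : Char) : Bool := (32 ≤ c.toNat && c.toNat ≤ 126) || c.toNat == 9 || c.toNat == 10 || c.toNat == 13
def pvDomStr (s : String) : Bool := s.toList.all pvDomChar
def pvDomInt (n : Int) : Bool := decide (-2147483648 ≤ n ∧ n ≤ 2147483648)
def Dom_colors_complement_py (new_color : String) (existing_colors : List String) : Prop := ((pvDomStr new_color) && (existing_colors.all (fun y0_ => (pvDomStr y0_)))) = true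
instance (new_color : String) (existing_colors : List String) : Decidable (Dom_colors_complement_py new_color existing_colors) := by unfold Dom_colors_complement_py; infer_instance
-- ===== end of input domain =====

-- B replaces A's per-call loop over the five complementary sets with a
-- precomputed inverted index (color -> union of its complementary sets): one
-- lookup plus one set intersection per call (objective: idiomatic).

-- ===== PORT A =====
def pvCompSets : List (PySem.Set String) :=
  [PySem.Set.ofList ["navy", "white", "grey", "black"],
   PySem.Set.ofList ["black", "white", "grey"],
   PySem.Set.ofList ["brown", "beige", "cream", "tan"],
   PySem.Set.ofList ["blue", "white", "grey"],
   PySem.Set.ofList ["green", "brown", "beige"]]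

def pvNeutrals : PySem.Set String :=
  PySem.Set.ofList ["black", "white", "grey", "navy", "beige", "cream"]

-- the 'for color_set in complementary_sets' loop with its early return
def pvLoopA (new_color : String) (existing_colors : List String) :
    List (PySem.Set String) → Bool
  | [] =>
      if pvNeutrals.contains new_color then true
      else decide (existing_colors.length = 0)
  | s :: rest =>
      if s.contains new_color && existing_colors.any (fun e => s.contains e) then true
      else pvLoopA new_color existing_colors rest

def colors_complement_py (new_color : String) (existing_colors : List String) : Bool :=
  pvLoopA new_color existing_colors pvCompSets

-- ===== PORT B =====
def pvGroupsB : List (List String) :=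
  [["navy", "white", "grey", "black"],
   ["black", "white", "grey"],
   ["brown", "beige", "cream", "tan"],
   ["blue", "white", "grey"],
   ["green", "brown", "beige"]]

-- the module-level index-building loop of Source B
def pvPartners : PySem.Dict String (PySem.Set String) :=
  pvGroupsB.foldl
    (fun d g =>
      g.foldl
        (fun d c =>
          d.insert c (PySem.Set.union (d.getD c PySem.Set.empty) (PySem.Set.ofList g)))
        d)
    PySem.Dict.empty

def pvNeutralsB : PySem.Set String :=
  PySem.Set.ofList ["black", "white", "grey", "navy", "beige", "cream"]

def colors_complement_py_alt (new_color : String) (existing_colors : List String) : Bool :=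
  if (PySem.Set.inter (pvPartners.getD new_color PySem.Set.empty)
        (PySem.Set.ofList existing_colors)).length ≠ 0 then true
  else if pvNeutralsB.contains new_color then true
  else decide (existing_colors.length = 0)

-- ===== PRECONDITION & SPEC =====
def Spec_colors_complement_py (new_color : String) (existing_colors : List String) (out : Bool) : Prop := out = colors_complement_py_alt new_color existing_colors
instance (new_color : String) (existing_colors : List String) (out : Bool) : Decidable (Spec_colors_complement_py new_color existing_colors out) := by unfold Spec_colors_complement_py; infer_instance

-- ===== CLAIM (what is proved, stated in full; the proofs are below) =====
def Claim_equal_colors_complement_py : Prop := ∀ (new_color : String) (existing_colors : List String), Dom_colors_complement_py new_color existing_colors → Spec_colors_complement_py new_color existing_colors (colors_complement_py new_color existing_colors)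

-- ===== LEMMAS AND PROOFS =====

-- the index evaluates to this literal dictionary
set_option maxHeartbeats 2000000 in
theorem pvPartners_eq : pvPartners = PySem.Dict.mk
    [("navy", ["navy", "white", "grey", "black"]),
     ("white", ["navy", "white", "grey", "black", "blue"]),
     ("grey", ["navy", "white", "grey", "black", "blue"]),
     ("black", ["navy", "white", "grey", "black"]),
     ("brown", ["brown", "beige", "cream", "tan", "green"]),
     ("beige", ["brown", "beige", "cream", "tan", "green"]),
     ("cream", ["brown", "beige", "cream", "tan"]),
     ("tan", ["brown", "beige", "cream", "tan"]),
     ("blue", ["blue", "white", "grey"]),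
     ("green", ["green", "brown", "beige"])] := by decide

theorem pvFind?_cons_if {α : Type} (p : α → Bool) (a : α) (l : List α) :
    List.find? p (a :: l) = if p a then some a else List.find? p l := by
  rw [List.find?_cons]; split <;> simp_all

-- membership in the indexed partner set = membership in some complementary set containing new_color
set_option maxHeartbeats 2000000 in
theorem mem_partners (nc e : String) :
    e ∈ pvPartners.getD nc PySem.Set.empty ↔
      ∃ s ∈ pvCompSets, nc ∈ s ∧ e ∈ s := by
  rw [pvPartners_eq]
  simp only [PySem.Dict.getD, PySem.Dict.get?, pvFind?_cons_if, List.find?_nil]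
  split_ifs with h1 h2 h3 h4 h5 h6 h7 h8 h9 h10 <;>
    simp only [beq_iff_eq] at * <;> subst_eqs <;>
    simp_all [pvCompSets, PySem.Set.ofList, PySem.Set.add, PySem.Set.empty, Option.getD,
      eq_comm] <;>
    tauto

theorem loopA_iff (nc : String) (ex : List String) (l : List (PySem.Set String)) :
    pvLoopA nc ex l = true ↔
      (∃ s ∈ l, nc ∈ s ∧ ∃ e ∈ ex, e ∈ s) ∨ pvNeutrals.contains nc = true ∨ ex.length = 0 := by
  induction l with
  | nil =>
      simp only [pvLoopA]
      split_ifs with h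
      · exact iff_of_true rfl (Or.inr (Or.inl h))
      · rw [decide_eq_true_eq]
        constructor
        · exact fun h' => Or.inr (Or.inr h')
        · rintro (⟨s, hs, -⟩ | hc | h')
          · simp at hs
          · exact absurd hc h
          · exact h'
  | cons s rest ih =>
      simp only [pvLoopA]
      split_ifs with h <;>
        simp only [Bool.and_eq_true, List.any_eq_true, PySem.Set.contains_iff] at h
      · simp only [true_iff]
        exact Or.inl ⟨s, List.mem_cons_self .., h⟩
      · rw [ih]
        constructor
        · rintro (⟨t, ht, hc⟩ | h')
          · exact Or.inl ⟨t, List.mem_cons_of_mem _ ht, hc⟩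
          · exact Or.inr h'
        · rintro (⟨t, ht, hc⟩ | h')
          · rcases List.mem_cons.1 ht with rfl | ht'
            · exact absurd hc h
            · exact Or.inl ⟨t, ht', hc⟩
          · exact Or.inr h'

theorem alt_iff (nc : String) (ex : List String) :
    colors_complement_py_alt nc ex = true ↔
      (∃ e ∈ ex, e ∈ pvPartners.getD nc PySem.Set.empty) ∨
        pvNeutralsB.contains nc = true ∨ ex.length = 0 := by
  unfold colors_complement_py_alt
  split_ifs with h1 h2
  · refine iff_of_true rfl (Or.inl ?_)
    obtain ⟨e, he⟩ := List.exists_mem_of_length_pos (Nat.pos_of_ne_zero h1)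
    rw [PySem.Set.mem_inter] at he
    exact ⟨e, (PySem.Set.mem_ofList _ _).1 he.2, he.1⟩
  · exact iff_of_true rfl (Or.inr (Or.inl h2))
  · simp only [not_ne_iff, List.length_eq_zero_iff] at h1
    have hno : ∀ e ∈ ex, e ∉ pvPartners.getD nc PySem.Set.empty := by
      intro e he hmem
      have hin : e ∈ PySem.Set.inter (pvPartners.getD nc PySem.Set.empty) (PySem.Set.ofList ex) :=
        (PySem.Set.mem_inter ..).2 ⟨hmem, (PySem.Set.mem_ofList _ _).2 he⟩
      rw [h1] at hin; simp at hin
    rw [decide_eq_true_eq]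
    constructor
    · exact fun h => Or.inr (Or.inr h)
    · rintro (⟨e, he, hmem⟩ | hc | h')
      · exact absurd hmem (hno e he)
      · exact absurd hc h2
      · exact h'

-- ===== VERDICT (by name: the statement is the Claim_ definition above) =====
theorem colors_complement_py_spec : Claim_equal_colors_complement_py := by
  intro nc ex _
  unfold Spec_colors_complement_py colors_complement_py
  rw [Bool.eq_iff_iff, loopA_iff, alt_iff]
  have hn : pvNeutrals = pvNeutralsB := rfl
  rw [hn]
  constructor
  · rintro (⟨s, hs, hn', e, he, hes⟩ | h')
    · exact Or.inl ⟨e, he, (mem_partners nc e).2 ⟨s, hs, hn', hes⟩⟩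
    · exact Or.inr h'
  · rintro (⟨e, he, hmem⟩ | h')
    · obtain ⟨s, hs, hn', hes⟩ := (mem_partners nc e).1 hmem
      exact Or.inl ⟨s, hs, hn', e, he, hes⟩
    · exact Or.inr h'
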